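-- pv_equiv track=rewrite | github.com/bidcoinauction/gsmgio_puzzle_kit | movement_pattern_validator.py | fibonacci_order
-- ===== SOURCE A (Python) =====
-- def fibonacci_order(coords: list) -> list:
--     """Order coordinates based on Fibonacci sequence."""
--     def fibonacci(n):
--         if n <= 1:
--             return n
--         a, b = 0, 1
--         for _ in range(2, n + 1):
--             a, b = b, a + b
--         return b
--
--     def fib_score(coord):
--         x, y = coord
--         return fibonacci(x % 20) + fibonacci(y % 20)
--
--     indexed_coords = [(i, coord) for i, coord in enumerate(coords)]
--     sorted_coords = sorted(indexed_coords, key=lambda x: fib_score(x[1]))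
--     return [i for i, _ in sorted_coords]
-- ===== SOURCE B (Python) =====
-- def fibonacci_order(coords: list) -> list:
--     """Order coordinates based on Fibonacci sequence."""
--     def fibonacci(n):
--         if n <= 1:
--             return n
--         a, b = 0, 1
--         for _ in range(2, n + 1):
--             a, b = b, a + b
--         return b
--
--     def fib_score(coord):
--         x, y = coord
--         return fibonacci(x % 20) + fibonacci(y % 20)
--
--     buckets = {}
--     for i, coord in enumerate(coords):
--         buckets.setdefault(fib_score(coord), []).append(i)
--     result = []
--     for s in sorted(buckets):
--         result.extend(buckets[s])
--     return result
-- ===== Notes on version B (the rewrite author's own statement) =====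
-- stated objective: alternative
-- what changed: B replaces the comparison sort of (index, coord) pairs by a bucket/grouping pass: one dict mapping each Fibonacci score to its indices in order, then the buckets emitted by ascending score key.
import Mathlib
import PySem

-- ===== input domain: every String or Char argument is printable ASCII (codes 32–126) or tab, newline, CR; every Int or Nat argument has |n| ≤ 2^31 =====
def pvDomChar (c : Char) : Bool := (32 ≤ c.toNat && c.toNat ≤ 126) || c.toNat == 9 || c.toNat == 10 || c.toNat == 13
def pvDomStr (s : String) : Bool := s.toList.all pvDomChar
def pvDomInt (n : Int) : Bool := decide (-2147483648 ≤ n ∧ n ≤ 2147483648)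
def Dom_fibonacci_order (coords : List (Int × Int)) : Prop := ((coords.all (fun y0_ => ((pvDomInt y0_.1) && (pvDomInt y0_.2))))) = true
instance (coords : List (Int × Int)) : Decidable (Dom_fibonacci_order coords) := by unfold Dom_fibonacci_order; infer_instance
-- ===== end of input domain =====

-- B groups indices into buckets keyed by Fibonacci score and emits them by ascending score,
-- instead of A's comparison sort of (index, coord) pairs; same return value everywhere.

-- ===== PORT A =====
-- shared helper: A's nested 'fibonacci' (loop over range(2, n+1))
def pvFibonacci (n : Int) : Int :=
  if n ≤ 1 then n
  else ((PySem.List.pyRange 2 (n + 1) 1).foldl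
    (fun (ab : Int × Int) _ => (ab.2, ab.1 + ab.2)) ((0 : Int), (1 : Int))).2

-- shared helper: A's nested 'fib_score'
def pvFibScore (c : Int × Int) : Int :=
  pvFibonacci (PySem.Int.mod c.1 20) + pvFibonacci (PySem.Int.mod c.2 20)

def fibonacci_order (coords : List (Int × Int)) : List Int :=
  let indexed_coords := PySem.List.enumerate coords
  let sorted_coords := PySem.List.sorted indexed_coords (fun x => pvFibScore x.2)
  sorted_coords.map (fun x => x.1)

-- ===== PORT B =====
-- buckets.setdefault(score, []).append(i) is ported as modify with default [];
-- buckets[s] in the output loop is ported as getD (the key is always present).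
def fibonacci_order_alt (coords : List (Int × Int)) : List Int :=
  let buckets := (PySem.List.enumerate coords).foldl
    (fun d p => d.modify (pvFibScore p.2) [] (fun lst => lst ++ [p.1]))
    (PySem.Dict.empty : PySem.Dict Int (List Int))
  (PySem.List.sorted buckets.keys (fun s => s)).foldl
    (fun acc s => acc ++ buckets.getD s []) []

-- ===== PRECONDITION & SPEC =====
def Spec_fibonacci_order (coords : List (Int × Int)) (out : List Int) : Prop := out = fibonacci_order_alt coords
instance (coords : List (Int × Int)) (out : List Int) : Decidable (Spec_fibonacci_order coords out) := by unfold Spec_fibonacci_order; infer_instance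

-- ===== CLAIM (what is proved, stated in full; the proofs are below) =====
def Claim_equal_fibonacci_order : Prop := ∀ (coords : List (Int × Int)), Dom_fibonacci_order coords → Spec_fibonacci_order coords (fibonacci_order coords)

-- ===== LEMMAS AND PROOFS =====

-- a stable insertion inserts x after every element of key ≤ k x and before any of key > k x
theorem insertBy_middle {α : Type} (k : α → Int) (x : α) (as bs : List α)
    (ha : ∀ a ∈ as, ¬ (k x < k a)) (hb : ∀ b ∈ bs, k x < k b) :
    PySem.List.insertBy (fun a b => decide (k a < k b)) x (as ++ bs) = as ++ x :: bs := by
  induction as with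
  | nil =>
    cases bs with
    | nil => simp [PySem.List.insertBy]
    | cons b bs => simp [PySem.List.insertBy, hb b (by simp)]
  | cons a as ih =>
    have hna : ¬ (k x < k a) := ha a (by simp)
    simp only [List.cons_append]
    rw [show PySem.List.insertBy (fun a b => decide (k a < k b)) x (a :: (as ++ bs))
        = a :: PySem.List.insertBy (fun a b => decide (k a < k b)) x (as ++ bs) by
      simp [PySem.List.insertBy, hna]]
    rw [ih (fun a ha' => ha a (by simp [ha']))]

-- splitting a strictly increasing list of keys around a member
theorem split_lt_mem {K : List Int} (hK : K.Pairwise (· < ·)) {v : Int} (hv : v ∈ K) :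
    ∃ p q, K = p ++ v :: q ∧ (∀ s ∈ p, s < v) ∧ (∀ s ∈ q, v < s) := by
  obtain ⟨p, q, rfl⟩ := List.append_of_mem hv
  refine ⟨p, q, rfl, ?_, ?_⟩
  · intro s hs
    exact (List.pairwise_append.mp hK).2.2 s hs v (by simp)
  · intro s hs
    exact (List.pairwise_cons.mp (List.pairwise_append.mp hK).2.1).1 s hs

-- splitting a strictly increasing list of keys around a non-member
theorem split_lt_not_mem {K : List Int} (hK : K.Pairwise (· < ·)) {v : Int} (hv : v ∉ K) :
    ∃ p q, K = p ++ q ∧ (∀ s ∈ p, s < v) ∧ (∀ s ∈ q, v < s) := by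
  induction K with
  | nil => exact ⟨[], [], rfl, by simp, by simp⟩
  | cons a K ih =>
    rcases List.pairwise_cons.mp hK with ⟨halt, hK'⟩
    by_cases hav : a < v
    · obtain ⟨p, q, hEq, hp, hq⟩ := ih hK' (fun h => hv (by simp [h]))
      exact ⟨a :: p, q, by simp [hEq], by
        intro s hs; rcases List.mem_cons.mp hs with h | h
        · exact h ▸ hav
        · exact hp s h, hq⟩
    · have hva : v < a := lt_of_le_of_ne (not_lt.mp hav) (fun h => hv (by simp [h]))
      refine ⟨[], a :: K, by simp, by simp, ?_⟩
      intro s hs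
      rcases List.mem_cons.mp hs with h | h
      · exact h ▸ hva
      · exact lt_trans hva (halt s h)

-- elements of a key-filtered bucket all have that key
theorem key_of_mem_bucket {α : Type} (k : α → Int) (l : List α) (s : Int) {a : α}
    (h : a ∈ l.filter (fun y => k y == s)) : k a = s := by
  have := (List.mem_filter.mp h).2
  simpa using this

-- MAIN LEMMA: Python's stable sort by an Int key equals the concatenation, by ascending key,
-- of the buckets of elements sharing each key (in original order).
theorem sorted_eq_flatMap_buckets {α : Type} (k : α → Int) (l : List α) :
    PySem.List.sorted l k =
      (PySem.List.sorted (PySem.List.dedup (l.map k)) (fun s => s)).flatMap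
        (fun s => l.filter (fun y => k y == s)) := by
  induction l using List.reverseRecOn with
  | nil => simp [PySem.List.sorted_eq_foldl_insertBy, PySem.List.dedup]
  | append_singleton l x ih =>
    set v := k x with hv
    set m := l.map k with hm
    set K := PySem.List.sorted (PySem.List.dedup m) (fun s => s) with hKdef
    have hKpw : K.Pairwise (· < ·) := by
      rw [hKdef, PySem.List.dedup_eq_ofList]
      exact PySem.List.sorted_ofList_pairwise_lt m
    have hKperm : K.Perm (PySem.List.dedup m) := PySem.List.sorted_perm _ _ _
    have hKmem : ∀ s, s ∈ K ↔ s ∈ m := by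
      intro s
      rw [hKperm.mem_iff, PySem.List.mem_dedup]
    -- LHS: appending x means one more stable insertion
    have hLHS : PySem.List.sorted (l ++ [x]) k =
        PySem.List.insertBy (fun a b => decide (k a < k b)) x (PySem.List.sorted l k) := by
      rw [PySem.List.sorted_eq_foldl_insertBy, PySem.List.sorted_eq_foldl_insertBy,
        List.foldl_append, List.foldl_cons, List.foldl_nil]
    -- the buckets of l ++ [x]
    have hbuck : ∀ s : Int, (l ++ [x]).filter (fun y => k y == s) =
        l.filter (fun y => k y == s) ++ (if v = s then [x] else []) := by
      intro s
      rw [List.filter_append]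
      congr 1
      rw [List.filter_singleton]
      by_cases hvs : v = s
      · simp [← hv, hvs]
      · have hb : (v == s) = false := by simpa using hvs
        simp [← hv, hb]
        exact hvs
    have hmapk : (l ++ [x]).map k = m ++ [v] := by simp [hm, hv]
    -- key facts about bucket members
    have hkb : ∀ s : Int, ∀ a ∈ l.filter (fun y => k y == s), k a = s :=
      fun s a ha => key_of_mem_bucket k l s ha
    by_cases hmem : v ∈ m
    · -- the score already occurs: the key list is unchanged, x joins its bucket
      have hded : PySem.List.dedup (m ++ [v]) = PySem.List.dedup m := by
        rw [PySem.List.dedup_eq_ofList, PySem.List.dedup_eq_ofList, PySem.Set.ofList_append,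
          PySem.Set.update_eq_append_filter]
        have h1 : PySem.Set.ofList [v] = [v] := rfl
        simp [h1, hmem]
      obtain ⟨p, q, hKs, hp, hq⟩ := split_lt_mem hKpw ((hKmem v).mpr hmem)
      rw [hLHS, ih, hmapk, hded, ← hKdef, hKs]
      simp only [List.flatMap_append, List.flatMap_cons]
      rw [show p.flatMap (fun s => l.filter (fun y => k y == s)) ++
            (l.filter (fun y => k y == v) ++ q.flatMap (fun s => l.filter (fun y => k y == s)))
          = (p.flatMap (fun s => l.filter (fun y => k y == s)) ++ l.filter (fun y => k y == v))
            ++ q.flatMap (fun s => l.filter (fun y => k y == s)) by simp]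
      rw [insertBy_middle k x _ _ ?_ ?_]
      · -- both sides are the same regrouping
        have : ∀ s ∈ p, (l ++ [x]).filter (fun y => k y == s) = l.filter (fun y => k y == s) := by
          intro s hs; rw [hbuck s]; simp [ne_of_gt (hp s hs)]
        have hq' : ∀ s ∈ q, (l ++ [x]).filter (fun y => k y == s) = l.filter (fun y => k y == s) := by
          intro s hs; rw [hbuck s]; simp [ne_of_lt (hq s hs)]
        rw [List.flatMap_congr this, List.flatMap_congr hq', hbuck v]
        simp
      · -- nothing before x's spot has a larger key
        intro a ha
        rcases List.mem_append.mp ha with h | h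
        · obtain ⟨s, hs, ha'⟩ := List.mem_flatMap.mp h
          rw [hkb s a ha']
          exact not_lt.mpr (le_of_lt (hp s hs))
        · rw [hkb v a h]
          exact lt_irrefl v
      · -- everything after x's spot has a strictly larger key
        intro b hbmem
        obtain ⟨s, hs, hb'⟩ := List.mem_flatMap.mp hbmem
        rw [hkb s b hb']
        exact hq s hs
    · -- a new score: its singleton bucket is spliced in at the sorted position
      have hded : PySem.List.dedup (m ++ [v]) = PySem.List.dedup m ++ [v] := by
        rw [PySem.List.dedup_eq_ofList, PySem.List.dedup_eq_ofList, PySem.Set.ofList_append,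
          PySem.Set.update_eq_append_filter]
        have h1 : PySem.Set.ofList [v] = [v] := rfl
        simp [h1, hmem]
      obtain ⟨p, q, hKs, hp, hq⟩ := split_lt_not_mem hKpw (fun h => hmem ((hKmem v).mp h))
      -- the new sorted key list is p ++ v :: q
      have hK' : PySem.List.sorted (PySem.List.dedup m ++ [v]) (fun s => s) = p ++ v :: q := by
        apply PySem.List.sorted_eq_of_perm_of_pairwise_lt
        · have h1 : (p ++ v :: q).Perm (v :: K) := by rw [hKs]; exact List.perm_middle
          have h4 : (v :: PySem.List.dedup m).Perm (PySem.List.dedup m ++ [v]) := by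
            simpa using
              (List.perm_middle (l₁ := PySem.List.dedup m) (l₂ := ([] : List Int)) (a := v)).symm
          exact (h1.trans (hKperm.cons v)).trans h4
        · rw [List.pairwise_append]
          refine ⟨(List.pairwise_append.mp (hKs ▸ hKpw)).1, ?_, ?_⟩
          · rw [List.pairwise_cons]
            exact ⟨hq, (List.pairwise_append.mp (hKs ▸ hKpw)).2.1⟩
          · intro a ha b hb
            rcases List.mem_cons.mp hb with h | h
            · exact h ▸ hp a ha
            · exact (List.pairwise_append.mp (hKs ▸ hKpw)).2.2 a ha b h
      have hbv : l.filter (fun y => k y == v) = [] := by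
        rw [List.filter_eq_nil_iff]
        intro a ha h
        exact hmem (hm ▸ List.mem_map.mpr ⟨a, ha, by simpa using h⟩)
      rw [hLHS, ih, hmapk, hded, hK', hKs]
      simp only [List.flatMap_append, List.flatMap_cons]
      rw [insertBy_middle k x _ _ ?_ ?_]
      · have : ∀ s ∈ p, (l ++ [x]).filter (fun y => k y == s) = l.filter (fun y => k y == s) := by
          intro s hs; rw [hbuck s]; simp [ne_of_gt (hp s hs)]
        have hq' : ∀ s ∈ q, (l ++ [x]).filter (fun y => k y == s) = l.filter (fun y => k y == s) := by
          intro s hs; rw [hbuck s]; simp [ne_of_lt (hq s hs)]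
        rw [List.flatMap_congr this, List.flatMap_congr hq', hbuck v, hbv]
        simp
      · intro a ha
        obtain ⟨s, hs, ha'⟩ := List.mem_flatMap.mp ha
        rw [hkb s a ha']
        exact not_lt.mpr (le_of_lt (hp s hs))
      · intro b hbmem
        obtain ⟨s, hs, hb'⟩ := List.mem_flatMap.mp hbmem
        rw [hkb s b hb']
        exact hq s hs

-- the two ports compute the same list
theorem fibonacci_order_eq_alt (coords : List (Int × Int)) :
    fibonacci_order coords = fibonacci_order_alt coords := by
  show (PySem.List.sorted (PySem.List.enumerate coords) (fun x => pvFibScore x.2)).map (fun x => x.1)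
    = (PySem.List.sorted
        ((PySem.List.enumerate coords).foldl
          (fun d p => d.modify (pvFibScore p.2) [] (fun lst => lst ++ [p.1]))
          (PySem.Dict.empty : PySem.Dict Int (List Int))).keys (fun s => s)).foldl
        (fun acc s => acc ++ ((PySem.List.enumerate coords).foldl
          (fun d p => d.modify (pvFibScore p.2) [] (fun lst => lst ++ [p.1]))
          (PySem.Dict.empty : PySem.Dict Int (List Int))).getD s []) []
  set e := PySem.List.enumerate coords with he
  set B := e.foldl (fun d p => d.modify (pvFibScore p.2) [] (fun lst => lst ++ [p.1]))
    (PySem.Dict.empty : PySem.Dict Int (List Int)) with hB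
  -- the dict's keys are the distinct scores in first-occurrence order
  have hkeys : B.keys = PySem.List.dedup (e.map (fun p => pvFibScore p.2)) := by
    rw [hB, PySem.Dict.keys_foldl_modify_key e (fun p => pvFibScore p.2) []
      (fun _ p lst => lst ++ [p.1]) PySem.Dict.empty,
      PySem.List.dedup_eq_ofList, PySem.Set.update_eq_append_filter]
    simp [PySem.Set.contains, PySem.Dict.empty, PySem.Dict.keys]
  -- each bucket holds the indices whose coordinate has that score, in order
  have hgetD : ∀ s : Int, B.getD s []
      = (e.filter (fun p => pvFibScore p.2 == s)).map (fun p => p.1) := by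
    intro s
    have h := PySem.Dict.getD_foldl_modify_append
      (e.map (fun p => ((pvFibScore p.2 : Int), p.1))) PySem.Dict.empty s
    rw [List.foldl_map] at h
    have h2 : B.getD s [] = PySem.Dict.empty.getD s []
        ++ ((e.map (fun p => ((pvFibScore p.2 : Int), p.1))).filter
              (fun q => q.1 == s)).map (fun q => q.2) := by
      rw [hB]; exact h
    have h3 : ((e.map (fun p => ((pvFibScore p.2 : Int), p.1))).filter
          (fun q => q.1 == s)).map (fun q => q.2)
        = (e.filter (fun p => pvFibScore p.2 == s)).map (fun p => p.1) := by
      rw [List.filter_map, List.map_map]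
      rfl
    have h4 : (PySem.Dict.empty : PySem.Dict Int (List Int)).getD s [] = [] := rfl
    rw [h2, h3, h4, List.nil_append]
  rw [PySem.List.foldl_append_eq_flatMap, hkeys,
    sorted_eq_flatMap_buckets (fun p => pvFibScore p.2) e, List.map_flatMap, List.nil_append]
  apply List.flatMap_congr
  intro s _
  rw [hgetD s]

-- ===== VERDICT (by name: the statement is the Claim_ definition above) =====
theorem fibonacci_order_spec : Claim_equal_fibonacci_order := by
  intro coords _
  exact fibonacci_order_eq_alt coords
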